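-- pv_equiv track=rewrite | github.com/colingrodecoeur360/AOC2019 | day20/solutions.py | compute_matching_doors
-- ===== SOURCE A (Python) =====
-- def compute_matching_doors(grid):
--     doors = {}
--     for i, row in enumerate(grid):
--         for j, value in enumerate(row):
--             if value == ".":
--                 for (x, y) in ((-1, 0), (1, 0), (0, -1), (0, 1)):
--                     if grid[i + x][j + y].isalpha() and grid[i + 2 * x][j + 2 * y].isalpha():
--                         door = grid[min(i + x, i + 2 * x)][min(j + y, j + 2 * y)] + grid[max(i + x, i + 2 * x)][
--                             max(j + y, j + 2 * y)]
--                         if door in doors: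
--                             doors[door].append((i, j))
--                         else:
--                             doors[door] = [(i, j)]
--
--     matching_doors = {}
--     start_position = None
--     end_position = None
--     for door, positions in doors.items():
--         if len(positions) == 2:
--             matching_doors[positions[0]] = positions[1]
--             matching_doors[positions[1]] = positions[0]
--         if door == "AA":
--             start_position = positions[0]
--         if door == "ZZ":
--             end_position = positions[0]
--     return matching_doors, start_position, end_position
-- ===== SOURCE B (Python) =====
-- def compute_matching_doors(grid):
--     # Scan for letter pairs: a letter whose right or lower neighbour is also a
--     # letter forms a label; the open cell just before or just after the pair is
--     # a portal opening.  Openings are processed in reading order of the maze.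
--     events = []  # (row, col, label) of each portal opening
--     for p, row in enumerate(grid):
--         for q, cell in enumerate(row):
--             if cell.isalpha():
--                 if p + 1 < len(grid) and q < len(grid[p + 1]) and grid[p + 1][q].isalpha():
--                     label = cell + grid[p + 1][q]
--                     if p >= 1 and q < len(grid[p - 1]) and grid[p - 1][q] == ".":
--                         events.append((p - 1, q, label))
--                     if p + 2 < len(grid) and q < len(grid[p + 2]) and grid[p + 2][q] == ".":
--                         events.append((p + 2, q, label))
--                 if q + 1 < len(row) and row[q + 1].isalpha():
--                     label = cell + row[q + 1]
--                     if q >= 1 and row[q - 1] == ".":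
--                         events.append((p, q - 1, label))
--                     if q + 2 < len(row) and row[q + 2] == ".":
--                         events.append((p, q + 2, label))
--     events.sort(key=lambda e: (e[0], e[1]))
--     doors = {}
--     for i, j, label in events:
--         doors.setdefault(label, []).append((i, j))
--     matching_doors = {}
--     start_position = None
--     end_position = None
--     for door, positions in doors.items():
--         if len(positions) == 2:
--             matching_doors[positions[0]] = positions[1]
--             matching_doors[positions[1]] = positions[0]
--         if door == "AA":
--             start_position = positions[0]
--         if door == "ZZ":
--             end_position = positions[0]
--     return matching_doors, start_position, end_position
-- ===== Notes on version B (the rewrite author's own statement) =====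
-- stated objective: alternative
-- what changed: A scans '.' cells and probes two cells outward in four directions; B scans for adjacent letter pairs (a cell whose right or lower neighbour is alphabetic), records the open cell before/after each pair as a (row, col, label) event, sorts events into reading order of the maze and groups them by label. Pre_ excludes grids on which A raises IndexError, grids where a probe only finds its letters through negative-index wraparound (a phantom door on a malformed maze), and grids where one '.' cell touches two or more letter pairs (the resulting dict order is an accidental tie-break).
import Mathlib
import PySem

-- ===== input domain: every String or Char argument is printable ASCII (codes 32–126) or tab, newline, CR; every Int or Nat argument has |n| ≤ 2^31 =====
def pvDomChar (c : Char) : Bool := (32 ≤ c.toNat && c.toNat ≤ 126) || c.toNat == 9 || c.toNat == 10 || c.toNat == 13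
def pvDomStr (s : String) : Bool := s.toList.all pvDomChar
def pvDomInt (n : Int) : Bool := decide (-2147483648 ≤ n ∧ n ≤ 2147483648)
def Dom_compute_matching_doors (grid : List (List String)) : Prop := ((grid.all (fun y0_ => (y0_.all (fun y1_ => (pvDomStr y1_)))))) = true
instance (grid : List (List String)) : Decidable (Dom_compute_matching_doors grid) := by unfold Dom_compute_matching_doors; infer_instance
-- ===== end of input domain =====

-- B replaces A's '.'-cell probing by a letter-pair scan whose portal openings are handled
-- in reading order (objective: alternative, same cost).  Equality is about the RETURN
-- value (neither program mutates its argument).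

-- shared cell accessor: grid[i][j] with Python index semantics (negative = from-the-end);
-- exact wherever Python does not raise; where Python would raise IndexError (excluded by
-- Pre_ below) it reads "" instead.
def pvCell (grid : List (List String)) (i j : Int) : String :=
  PySem.List.pyGetD (PySem.List.pyGetD grid i []) j ""

-- ===== PORT A =====
-- 'if door in doors: doors[door].append(..) else: doors[door] = [..]'
def pvAddDoorA (doors : PySem.Dict String (List (Int × Int))) (door : String)
    (pos : Int × Int) : PySem.Dict String (List (Int × Int)) :=
  if doors.contains door then doors.modify door [] (fun l => l ++ [pos])
  else doors.insert door [pos]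

-- second phase of A: loop over doors.items; 'positions[0]'/'positions[1]' are rendered as
-- head-patterns (inside the len==2 branch they are exactly [p0, p1]; for AA/ZZ the list is
-- never empty for a dict built by the first phase, so the [] arm is unreachable there)
def pvPhase2A (doors : PySem.Dict String (List (Int × Int))) :
    (List (Int × Int × Int × Int)) × (Option (Int × Int)) × (Option (Int × Int)) :=
  let res := doors.items.foldl
    (fun (acc : PySem.Dict (Int × Int) (Int × Int) × Option (Int × Int) × Option (Int × Int)) pr =>
      let m := match pr.2 with
        | [p0, p1] => (acc.1.insert p0 p1).insert p1 p0
        | _ => acc.1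
      let s := if pr.1 == "AA" then (match pr.2 with | p :: _ => some p | [] => acc.2.1) else acc.2.1
      let e := if pr.1 == "ZZ" then (match pr.2 with | p :: _ => some p | [] => acc.2.2) else acc.2.2
      (m, s, e))
    (PySem.Dict.empty, none, none)
  (res.1.items.map (fun pr => (pr.1.1, pr.1.2, pr.2.1, pr.2.2)), res.2.1, res.2.2)

def compute_matching_doors (grid : List (List String)) :
    (List (Int × Int × Int × Int)) × (Option (Int × Int)) × (Option (Int × Int)) :=
  let doors := (PySem.List.enumerate grid).foldl (fun doors pr =>
    (PySem.List.enumerate pr.2).foldl (fun doors qc =>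
      if qc.2 == "." then
        ([((-1 : Int), (0 : Int)), (1, 0), (0, -1), (0, 1)]).foldl (fun doors xy =>
          if PySem.Str.strIsalpha (pvCell grid (pr.1 + xy.1) (qc.1 + xy.2)) &&
             PySem.Str.strIsalpha (pvCell grid (pr.1 + 2 * xy.1) (qc.1 + 2 * xy.2)) then
            pvAddDoorA doors
              (pvCell grid (min (pr.1 + xy.1) (pr.1 + 2 * xy.1)) (min (qc.1 + xy.2) (qc.1 + 2 * xy.2)) ++
               pvCell grid (max (pr.1 + xy.1) (pr.1 + 2 * xy.1)) (max (qc.1 + xy.2) (qc.1 + 2 * xy.2)))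
              (pr.1, qc.1)
          else doors) doors
      else doors) doors) PySem.Dict.empty
  pvPhase2A doors

-- ===== PORT B =====
-- 'doors.setdefault(label, []).append((i, j))'
def pvAddDoorB (doors : PySem.Dict String (List (Int × Int))) (label : String)
    (pos : Int × Int) : PySem.Dict String (List (Int × Int)) :=
  (doors.setdefault label []).modify label [] (fun l => l ++ [pos])

-- second phase of B (same Python text as A's second phase)
def pvPhase2B (doors : PySem.Dict String (List (Int × Int))) :
    (List (Int × Int × Int × Int)) × (Option (Int × Int)) × (Option (Int × Int)) :=
  let res := doors.items.foldl
    (fun (acc : PySem.Dict (Int × Int) (Int × Int) × Option (Int × Int) × Option (Int × Int)) pr =>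
      let m := match pr.2 with
        | [p0, p1] => (acc.1.insert p0 p1).insert p1 p0
        | _ => acc.1
      let s := if pr.1 == "AA" then (match pr.2 with | p :: _ => some p | [] => acc.2.1) else acc.2.1
      let e := if pr.1 == "ZZ" then (match pr.2 with | p :: _ => some p | [] => acc.2.2) else acc.2.2
      (m, s, e))
    (PySem.Dict.empty, none, none)
  (res.1.items.map (fun pr => (pr.1.1, pr.1.2, pr.2.1, pr.2.2)), res.2.1, res.2.2)

-- letter-pair scan: events (open_i, open_j, label)
def pvEventsB (grid : List (List String)) : List (Int × Int × String) :=
  (PySem.List.enumerate grid).foldl (fun ev pr =>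
    (PySem.List.enumerate pr.2).foldl (fun ev qc =>
      if PySem.Str.strIsalpha qc.2 then
        let ev :=
          if (pr.1 + 1 < (grid.length : Int) && qc.1 < ((PySem.List.pyGetD grid (pr.1 + 1) []).length : Int))
              && PySem.Str.strIsalpha (pvCell grid (pr.1 + 1) qc.1) then
            let label := qc.2 ++ pvCell grid (pr.1 + 1) qc.1
            let ev :=
              if (1 ≤ pr.1 && qc.1 < ((PySem.List.pyGetD grid (pr.1 - 1) []).length : Int))
                  && (pvCell grid (pr.1 - 1) qc.1 == ".") then
                ev ++ [(pr.1 - 1, qc.1, label)] else ev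
            if (pr.1 + 2 < (grid.length : Int) && qc.1 < ((PySem.List.pyGetD grid (pr.1 + 2) []).length : Int))
                && (pvCell grid (pr.1 + 2) qc.1 == ".") then
              ev ++ [(pr.1 + 2, qc.1, label)] else ev
          else ev
        if qc.1 + 1 < (pr.2.length : Int) && PySem.Str.strIsalpha (PySem.List.pyGetD pr.2 (qc.1 + 1) "") then
          let label := qc.2 ++ PySem.List.pyGetD pr.2 (qc.1 + 1) ""
          let ev :=
            if 1 ≤ qc.1 && (PySem.List.pyGetD pr.2 (qc.1 - 1) "" == ".") then
              ev ++ [(pr.1, qc.1 - 1, label)] else ev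
          if qc.1 + 2 < (pr.2.length : Int) && (PySem.List.pyGetD pr.2 (qc.1 + 2) "" == ".") then
            ev ++ [(pr.1, qc.1 + 2, label)] else ev
        else ev
      else ev) ev) []

def compute_matching_doors_alt (grid : List (List String)) :
    (List (Int × Int × Int × Int)) × (Option (Int × Int)) × (Option (Int × Int)) :=
  let events := PySem.List.sorted (pvEventsB grid) (fun e => toLex (e.1, e.2.1))
  let doors := events.foldl (fun d e => pvAddDoorB d e.2.2 (e.1, e.2.1)) PySem.Dict.empty
  pvPhase2B doors

-- ===== PRECONDITION & SPEC =====
abbrev pvInR (t : Int) (n : Nat) : Bool := decide (-(n : Int) ≤ t) && decide (t < (n : Int))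

-- A's probe condition from the '.' cell (i, j) in direction (x, y): both probed cells hold letters
def pvCondA (grid : List (List String)) (i j x y : Int) : Bool :=
  PySem.Str.strIsalpha (pvCell grid (i + x) (j + y)) &&
  PySem.Str.strIsalpha (pvCell grid (i + 2 * x) (j + 2 * y))

-- at most one of the four flags is set
def pvAtMostOne (a b c d : Bool) : Bool :=
  !(a && b || a && c || a && d || b && c || b && d || c && d)

-- safety of one probe of A from the '.' cell (i, j) in direction (x, y), evaluated exactly
-- as Python evaluates it (second cell only looked at when the first is alphabetic), plus:
-- a probe that finds two letters must do so at non-negative indices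
abbrev pvPreAt (grid : List (List String)) (i j x y : Int) : Bool :=
  pvInR (i + x) grid.length &&
  pvInR (j + y) (PySem.List.pyGetD grid (i + x) []).length &&
  (!PySem.Str.strIsalpha (pvCell grid (i + x) (j + y)) ||
    (pvInR (i + 2 * x) grid.length &&
     pvInR (j + 2 * y) (PySem.List.pyGetD grid (i + 2 * x) []).length &&
     (!PySem.Str.strIsalpha (pvCell grid (i + 2 * x) (j + 2 * y)) ||
       (decide (0 ≤ i + x) && decide (0 ≤ j + y) && decide (0 ≤ i + 2 * x) && decide (0 ≤ j + 2 * y)))))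

-- Pre_ excludes (a) grids on which A raises IndexError (a '.' cell whose two-cell probe runs
-- off the bottom/right of the grid or past the end of a short row), (b) grids where such a
-- probe only finds its two letters through Python's negative-index wraparound, i.e. reads them
-- from the opposite edge of the grid — that phantom door on a malformed maze is an accidental
-- value nobody would specify — and (c) grids where one '.' cell touches two or more letter
-- pairs: which of the equally adjacent labels claims the opening first is an accidental
-- tie-break of the iteration order (a well-formed day-20 maze gives each opening one label).
def Pre_compute_matching_doors (grid : List (List String)) : Prop :=
  ∀ i : Nat, i < grid.length → ∀ j : Nat, j < (grid.getD i []).length →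
    (grid.getD i []).getD j "" = "." →
      (pvPreAt grid i j (-1) 0 && pvPreAt grid i j 1 0 &&
       pvPreAt grid i j 0 (-1) && pvPreAt grid i j 0 1 &&
       pvAtMostOne (pvCondA grid i j (-1) 0) (pvCondA grid i j 1 0)
         (pvCondA grid i j 0 (-1)) (pvCondA grid i j 0 1)) = true

instance (grid : List (List String)) : Decidable (Pre_compute_matching_doors grid) := by
  unfold Pre_compute_matching_doors; infer_instance

def pvWitness_compute_matching_doors : List (List String) :=
  [["#", "A", "#"], ["#", "A", "#"], ["#", ".", "#"], ["#", "#", "#"]]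

def Spec_compute_matching_doors (grid : List (List String))
    (out : (List (Int × Int × Int × Int)) × (Option (Int × Int)) × (Option (Int × Int))) : Prop :=
  out = compute_matching_doors_alt grid
instance (grid : List (List String))
    (out : (List (Int × Int × Int × Int)) × (Option (Int × Int)) × (Option (Int × Int))) :
    Decidable (Spec_compute_matching_doors grid out) := by
  unfold Spec_compute_matching_doors; infer_instance

-- ===== CLAIM (what is proved, stated in full; the proofs are below) =====
def Claim_equal_compute_matching_doors : Prop := ∀ (grid : List (List String)), Dom_compute_matching_doors grid → Pre_compute_matching_doors grid → Spec_compute_matching_doors grid (compute_matching_doors grid)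

-- ===== LEMMAS AND PROOFS =====

-- canonical event lists ------------------------------------------------------
abbrev pvEv : Type := Int × Int × Int × String

def pvErase (e : pvEv) : Int × Int × String := (e.1, e.2.1, e.2.2.2)

def pvKey (e : pvEv) : Lex (Int × Int) := toLex (e.1, 4 * e.2.1 + e.2.2.1)

def pvKeyDot (e : Int × Int × String) : Lex (Int × Int) := toLex (e.1, e.2.1)

def pvLabelA (grid : List (List String)) (i j x y : Int) : String :=
  pvCell grid (min (i + x) (i + 2 * x)) (min (j + y) (j + 2 * y)) ++
  pvCell grid (max (i + x) (i + 2 * x)) (max (j + y) (j + 2 * y))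

def pvDirs : List (Int × Int) := [(-1, 0), (1, 0), (0, -1), (0, 1)]

def pvCandsA (grid : List (List String)) (i j : Int) : List pvEv :=
  if pvCell grid i j == "." then
    ((PySem.List.enumerate pvDirs).filter (fun kxy => pvCondA grid i j kxy.2.1 kxy.2.2)).map
      (fun kxy => (i, j, kxy.1, pvLabelA grid i j kxy.2.1 kxy.2.2))
  else []

def pvEventsCanonA (grid : List (List String)) : List pvEv :=
  (PySem.List.enumerate grid).flatMap (fun pr =>
    (PySem.List.enumerate pr.2).flatMap (fun qc => pvCandsA grid pr.1 qc.1))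

def pvCandsB (grid : List (List String)) (p q : Int) : List pvEv :=
  if PySem.Str.strIsalpha (pvCell grid p q) then
    (if (p + 1 < (grid.length : Int) && q < ((PySem.List.pyGetD grid (p + 1) []).length : Int))
        && PySem.Str.strIsalpha (pvCell grid (p + 1) q) then
      (if (1 ≤ p && q < ((PySem.List.pyGetD grid (p - 1) []).length : Int))
          && (pvCell grid (p - 1) q == ".") then
        [(p - 1, q, (1 : Int), pvCell grid p q ++ pvCell grid (p + 1) q)] else []) ++
      (if (p + 2 < (grid.length : Int) && q < ((PySem.List.pyGetD grid (p + 2) []).length : Int))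
          && (pvCell grid (p + 2) q == ".") then
        [(p + 2, q, (0 : Int), pvCell grid p q ++ pvCell grid (p + 1) q)] else [])
    else []) ++
    (if q + 1 < ((PySem.List.pyGetD grid p []).length : Int)
        && PySem.Str.strIsalpha (pvCell grid p (q + 1)) then
      (if 1 ≤ q && (pvCell grid p (q - 1) == ".") then
        [(p, q - 1, (3 : Int), pvCell grid p q ++ pvCell grid p (q + 1))] else []) ++
      (if q + 2 < ((PySem.List.pyGetD grid p []).length : Int)
          && (pvCell grid p (q + 2) == ".") then
        [(p, q + 2, (2 : Int), pvCell grid p q ++ pvCell grid p (q + 1))] else [])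
    else [])
  else []

def pvEventsCanonB (grid : List (List String)) : List pvEv :=
  (PySem.List.enumerate grid).flatMap (fun pr =>
    (PySem.List.enumerate pr.2).flatMap (fun qc => pvCandsB grid pr.1 qc.1))

-- phase-1 rewrites -----------------------------------------------------------
theorem pvCell_eq (grid : List (List String)) (ki kj : Nat) (hki : ki < grid.length)
    (hkj : kj < grid[ki].length) : pvCell grid ki kj = grid[ki][kj] := by
  simp [pvCell, PySem.List.pyGetD_natCast, List.getD_eq_getElem?_getD, hki, hkj]

theorem pvDirFoldA (grid : List (List String)) (i j : Int)
    (d : PySem.Dict String (List (Int × Int))) :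
    ([((-1 : Int), (0 : Int)), (1, 0), (0, -1), (0, 1)]).foldl (fun doors xy =>
        if PySem.Str.strIsalpha (pvCell grid (i + xy.1) (j + xy.2)) &&
           PySem.Str.strIsalpha (pvCell grid (i + 2 * xy.1) (j + 2 * xy.2)) then
          pvAddDoorA doors
            (pvCell grid (min (i + xy.1) (i + 2 * xy.1)) (min (j + xy.2) (j + 2 * xy.2)) ++
             pvCell grid (max (i + xy.1) (i + 2 * xy.1)) (max (j + xy.2) (j + 2 * xy.2)))
            (i, j)
        else doors) d
      = (((PySem.List.enumerate pvDirs).filter (fun kxy => pvCondA grid i j kxy.2.1 kxy.2.2)).map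
          (fun kxy => ((i, j, kxy.1, pvLabelA grid i j kxy.2.1 kxy.2.2) : pvEv))).foldl
          (fun d e => pvAddDoorA d e.2.2.2 (e.1, e.2.1)) d := by
  rw [show ([((-1 : Int), (0 : Int)), (1, 0), (0, -1), (0, 1)]) =
        (PySem.List.enumerate pvDirs).map (·.2) from (PySem.List.map_snd_enumerate pvDirs 0).symm]
  rw [List.foldl_map, List.foldl_map,
    PySem.List.foldl_if_eq_foldl_filter (fun kxy : Int × Int × Int =>
      PySem.Str.strIsalpha (pvCell grid (i + kxy.2.1) (j + kxy.2.2)) &&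
      PySem.Str.strIsalpha (pvCell grid (i + 2 * kxy.2.1) (j + 2 * kxy.2.2)))]
  rfl

theorem pvDoorsA_eq (grid : List (List String)) :
    ((PySem.List.enumerate grid).foldl (fun doors pr =>
      (PySem.List.enumerate pr.2).foldl (fun doors qc =>
        if qc.2 == "." then
          ([((-1 : Int), (0 : Int)), (1, 0), (0, -1), (0, 1)]).foldl (fun doors xy =>
            if PySem.Str.strIsalpha (pvCell grid (pr.1 + xy.1) (qc.1 + xy.2)) &&
               PySem.Str.strIsalpha (pvCell grid (pr.1 + 2 * xy.1) (qc.1 + 2 * xy.2)) then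
              pvAddDoorA doors
                (pvCell grid (min (pr.1 + xy.1) (pr.1 + 2 * xy.1)) (min (qc.1 + xy.2) (qc.1 + 2 * xy.2)) ++
                 pvCell grid (max (pr.1 + xy.1) (pr.1 + 2 * xy.1)) (max (qc.1 + xy.2) (qc.1 + 2 * xy.2)))
                (pr.1, qc.1)
            else doors) doors
        else doors) doors) PySem.Dict.empty) =
    (pvEventsCanonA grid).foldl (fun d e => pvAddDoorA d e.2.2.2 (e.1, e.2.1)) PySem.Dict.empty := by
  unfold pvEventsCanonA
  rw [List.foldl_flatMap]
  apply PySem.List.foldl_congr_mem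
  intro d pr hpr
  rw [List.foldl_flatMap]
  apply PySem.List.foldl_congr_mem
  intro d' qc hqc
  obtain ⟨ki, hki, hpr'⟩ := (PySem.List.mem_enumerate_iff _ _ _).mp hpr
  obtain ⟨kj, hkj, hqc'⟩ := (PySem.List.mem_enumerate_iff _ _ _).mp hqc
  have hpr2 : pr.2 = grid[ki] := by rw [hpr']
  have hpr1 : pr.1 = (ki : Int) := by rw [hpr']; simp
  have hqc1 : qc.1 = (kj : Int) := by rw [hqc']; simp
  have hkj' : kj < grid[ki].length := by rw [← hpr2]; exact hkj
  have hcell : pvCell grid pr.1 qc.1 = qc.2 := by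
    rw [hpr1, hqc1, pvCell_eq grid ki kj hki hkj', hqc']
    simp [hpr2]
  rw [pvCandsA, hcell]
  by_cases hdot : qc.2 == "."
  · rw [if_pos hdot, if_pos hdot]
    exact pvDirFoldA grid pr.1 qc.1 d'
  · rw [if_neg (by simpa using hdot), if_neg (by simpa using hdot)]
    rfl

theorem pvEventsB_eq (grid : List (List String)) :
    pvEventsB grid = (pvEventsCanonB grid).map pvErase := by
  unfold pvEventsB pvEventsCanonB
  have h : ∀ (ev : List (Int × Int × String)), ∀ pr ∈ PySem.List.enumerate grid,
      (PySem.List.enumerate pr.2).foldl (fun ev qc =>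
        if PySem.Str.strIsalpha qc.2 then
          let ev :=
            if (pr.1 + 1 < (grid.length : Int) && qc.1 < ((PySem.List.pyGetD grid (pr.1 + 1) []).length : Int))
                && PySem.Str.strIsalpha (pvCell grid (pr.1 + 1) qc.1) then
              let label := qc.2 ++ pvCell grid (pr.1 + 1) qc.1
              let ev :=
                if (1 ≤ pr.1 && qc.1 < ((PySem.List.pyGetD grid (pr.1 - 1) []).length : Int))
                    && (pvCell grid (pr.1 - 1) qc.1 == ".") then
                  ev ++ [(pr.1 - 1, qc.1, label)] else ev
              if (pr.1 + 2 < (grid.length : Int) && qc.1 < ((PySem.List.pyGetD grid (pr.1 + 2) []).length : Int))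
                  && (pvCell grid (pr.1 + 2) qc.1 == ".") then
                ev ++ [(pr.1 + 2, qc.1, label)] else ev
            else ev
          if qc.1 + 1 < (pr.2.length : Int) && PySem.Str.strIsalpha (PySem.List.pyGetD pr.2 (qc.1 + 1) "") then
            let label := qc.2 ++ PySem.List.pyGetD pr.2 (qc.1 + 1) ""
            let ev :=
              if 1 ≤ qc.1 && (PySem.List.pyGetD pr.2 (qc.1 - 1) "" == ".") then
                ev ++ [(pr.1, qc.1 - 1, label)] else ev
            if qc.1 + 2 < (pr.2.length : Int) && (PySem.List.pyGetD pr.2 (qc.1 + 2) "" == ".") then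
              ev ++ [(pr.1, qc.1 + 2, label)] else ev
          else ev
        else ev) ev
      = ev ++ (PySem.List.enumerate pr.2).flatMap (fun qc => (pvCandsB grid pr.1 qc.1).map pvErase) := by
    intro ev pr hpr
    rw [← PySem.List.foldl_append_eq_flatMap]
    apply PySem.List.foldl_congr_mem
    intro ev' qc hqc
    obtain ⟨ki, hki, hpr'⟩ := (PySem.List.mem_enumerate_iff _ _ _).mp hpr
    obtain ⟨kj, hkj, hqc'⟩ := (PySem.List.mem_enumerate_iff _ _ _).mp hqc
    have hpr1 : pr.1 = (ki : Int) := by rw [hpr']; simp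
    have hkj' : kj < grid[ki].length := by
      have : pr.2 = grid[ki] := by rw [hpr']
      rw [← this]; exact hkj
    have hrow : pr.2 = PySem.List.pyGetD grid pr.1 [] := by
      rw [hpr1]
      simp [hpr', PySem.List.pyGetD_natCast, List.getD_eq_getElem?_getD, hki]
    have hcell : qc.2 = pvCell grid pr.1 qc.1 := by
      have hqc1 : qc.1 = (kj : Int) := by rw [hqc']; simp
      rw [hpr1, hqc1, pvCell_eq grid ki kj hki hkj', hqc']
      simp [hpr']
    rw [pvCandsB]
    rw [hcell, hrow]
    simp only [pvCell]
    split_ifs <;> simp [pvErase, List.append_assoc]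
  calc (PySem.List.enumerate grid).foldl _ []
      = (PySem.List.enumerate grid).foldl (fun ev pr =>
          ev ++ (PySem.List.enumerate pr.2).flatMap (fun qc => (pvCandsB grid pr.1 qc.1).map pvErase)) [] := by
        apply PySem.List.foldl_congr_mem
        intro ev pr hpr
        exact h ev pr hpr
    _ = _ := by rw [PySem.List.foldl_append_eq_flatMap]; simp [List.map_flatMap]

theorem pvMem_candsA_iff (grid : List (List String)) (i j : Int) (e : pvEv) :
    e ∈ pvCandsA grid i j ↔ (pvCell grid i j == ".") = true ∧
      ((pvCondA grid i j (-1) 0 = true ∧ e = (i, j, 0, pvLabelA grid i j (-1) 0)) ∨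
       (pvCondA grid i j 1 0 = true ∧ e = (i, j, 1, pvLabelA grid i j 1 0)) ∨
       (pvCondA grid i j 0 (-1) = true ∧ e = (i, j, 2, pvLabelA grid i j 0 (-1))) ∨
       (pvCondA grid i j 0 1 = true ∧ e = (i, j, 3, pvLabelA grid i j 0 1))) := by
  unfold pvCandsA
  by_cases hdot : (pvCell grid i j == ".") = true
  · rw [if_pos hdot]
    simp only [pvDirs, PySem.List.enumerate_cons, PySem.List.enumerate_nil]
    by_cases h0 : pvCondA grid i j (-1) 0 <;>
      by_cases h1 : pvCondA grid i j 1 0 <;>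
        by_cases h2 : pvCondA grid i j 0 (-1) <;>
          by_cases h3 : pvCondA grid i j 0 1 <;>
            simp_all [List.filter_nil]
  · rw [if_neg hdot]
    simp_all

theorem pvMem_ite_nil {α : Type} (c : Bool) (l : List α) (e : α) :
    e ∈ (if c = true then l else []) ↔ c = true ∧ e ∈ l := by
  split <;> simp_all

theorem pvMem_candsB_iff (grid : List (List String)) (p q : Int) (e : pvEv) :
    e ∈ pvCandsB grid p q ↔ PySem.Str.strIsalpha (pvCell grid p q) = true ∧
      ((((p + 1 < (grid.length : Int) && q < ((PySem.List.pyGetD grid (p + 1) []).length : Int))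
            && PySem.Str.strIsalpha (pvCell grid (p + 1) q)) = true ∧
        ((1 ≤ p && q < ((PySem.List.pyGetD grid (p - 1) []).length : Int))
            && (pvCell grid (p - 1) q == ".")) = true ∧
        e = (p - 1, q, 1, pvCell grid p q ++ pvCell grid (p + 1) q)) ∨
       (((p + 1 < (grid.length : Int) && q < ((PySem.List.pyGetD grid (p + 1) []).length : Int))
            && PySem.Str.strIsalpha (pvCell grid (p + 1) q)) = true ∧
        ((p + 2 < (grid.length : Int) && q < ((PySem.List.pyGetD grid (p + 2) []).length : Int))
            && (pvCell grid (p + 2) q == ".")) = true ∧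
        e = (p + 2, q, 0, pvCell grid p q ++ pvCell grid (p + 1) q)) ∨
       ((q + 1 < ((PySem.List.pyGetD grid p []).length : Int)
            && PySem.Str.strIsalpha (pvCell grid p (q + 1))) = true ∧
        (1 ≤ q && (pvCell grid p (q - 1) == ".")) = true ∧
        e = (p, q - 1, 3, pvCell grid p q ++ pvCell grid p (q + 1))) ∨
       ((q + 1 < ((PySem.List.pyGetD grid p []).length : Int)
            && PySem.Str.strIsalpha (pvCell grid p (q + 1))) = true ∧
        (q + 2 < ((PySem.List.pyGetD grid p []).length : Int)
            && (pvCell grid p (q + 2) == ".")) = true ∧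
        e = (p, q + 2, 2, pvCell grid p q ++ pvCell grid p (q + 1)))) := by
  unfold pvCandsB
  rw [pvMem_ite_nil]
  simp only [List.mem_append, pvMem_ite_nil, List.mem_singleton]
  tauto

theorem pvMem_canonA_iff (grid : List (List String)) (e : pvEv) :
    e ∈ pvEventsCanonA grid ↔ ∃ ki kj : Nat, ki < grid.length ∧
      kj < (grid.getD ki []).length ∧ e ∈ pvCandsA grid ki kj := by
  unfold pvEventsCanonA
  simp only [List.mem_flatMap, PySem.List.mem_enumerate_iff]
  constructor
  · rintro ⟨pr, ⟨ki, hki, rfl⟩, qc, ⟨kj, hkj, rfl⟩, hm⟩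
    refine ⟨ki, kj, hki, ?_, by simpa using hm⟩
    simpa [List.getD_eq_getElem?_getD, List.getElem?_eq_getElem, hki] using hkj
  · rintro ⟨ki, kj, hki, hkj, hm⟩
    have hkj' : kj < grid[ki].length := by
      simpa [List.getD_eq_getElem?_getD, List.getElem?_eq_getElem, hki] using hkj
    exact ⟨((0 : Int) + ki, grid[ki]), ⟨ki, hki, rfl⟩,
      ⟨((0 : Int) + kj, grid[ki][kj]), ⟨kj, hkj', rfl⟩, by simpa using hm⟩⟩

theorem pvMem_canonB_iff (grid : List (List String)) (e : pvEv) :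
    e ∈ pvEventsCanonB grid ↔ ∃ kp kq : Nat, kp < grid.length ∧
      kq < (grid.getD kp []).length ∧ e ∈ pvCandsB grid kp kq := by
  unfold pvEventsCanonB
  simp only [List.mem_flatMap, PySem.List.mem_enumerate_iff]
  constructor
  · rintro ⟨pr, ⟨ki, hki, rfl⟩, qc, ⟨kj, hkj, rfl⟩, hm⟩
    refine ⟨ki, kj, hki, ?_, by simpa using hm⟩
    simpa [List.getD_eq_getElem?_getD, List.getElem?_eq_getElem, hki] using hkj
  · rintro ⟨ki, kj, hki, hkj, hm⟩
    have hkj' : kj < grid[ki].length := by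
      simpa [List.getD_eq_getElem?_getD, List.getElem?_eq_getElem, hki] using hkj
    exact ⟨((0 : Int) + ki, grid[ki]), ⟨ki, hki, rfl⟩,
      ⟨((0 : Int) + kj, grid[ki][kj]), ⟨kj, hkj', rfl⟩, by simpa using hm⟩⟩

-- order and distinctness -----------------------------------------------------
theorem pvKeyDot_lt_iff (a b : Int × Int × String) : pvKeyDot a < pvKeyDot b ↔
    a.1 < b.1 ∨ (a.1 = b.1 ∧ a.2.1 < b.2.1) := by
  simpa [pvKeyDot] using Prod.Lex.toLex_lt_toLex (x := (a.1, a.2.1)) (y := (b.1, b.2.1))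

theorem pvCandsA_shape (grid : List (List String)) (i j : Int) (e : pvEv)
    (he : e ∈ pvCandsA grid i j) : e.1 = i ∧ e.2.1 = j ∧ 0 ≤ e.2.2.1 ∧ e.2.2.1 ≤ 3 := by
  rw [pvMem_candsA_iff] at he
  rcases he.2 with ⟨_, rfl⟩ | ⟨_, rfl⟩ | ⟨_, rfl⟩ | ⟨_, rfl⟩ <;> refine ⟨rfl, rfl, ?_, ?_⟩ <;> simp

theorem pvPairwise_of_len_le_one {α : Type} (R : α → α → Prop) (l : List α)
    (h : l.length ≤ 1) : l.Pairwise R := by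
  match l, h with
  | [], _ => exact List.Pairwise.nil
  | [a], _ => simp

-- extraction of the five per-dot conjuncts of Pre_
theorem pv_and5 (a b c d e : Bool) (h : (a && b && c && d && e) = true) :
    a = true ∧ b = true ∧ c = true ∧ d = true ∧ e = true := by simp_all

-- under Pre_, each '.' cell contributes at most one event, so A's canonical event list is
-- strictly increasing in the opening's coordinates
theorem pvCanonA_pairwise_dot (grid : List (List String))
    (hpre : Pre_compute_matching_doors grid) :
    (pvEventsCanonA grid).Pairwise (fun a b => pvKeyDot (pvErase a) < pvKeyDot (pvErase b)) := by
  unfold pvEventsCanonA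
  rw [List.pairwise_flatMap]
  constructor
  · intro pr hpr
    rw [List.pairwise_flatMap]
    constructor
    · intro qc hqc
      obtain ⟨ki, hki, hpr'⟩ := (PySem.List.mem_enumerate_iff _ _ _).mp hpr
      obtain ⟨kj, hkj, hqc'⟩ := (PySem.List.mem_enumerate_iff _ _ _).mp hqc
      have hpr1 : pr.1 = (ki : Int) := by rw [hpr']; simp
      have hqc1 : qc.1 = (kj : Int) := by rw [hqc']; simp
      have hkj' : kj < grid[ki].length := by
        have : pr.2 = grid[ki] := by rw [hpr']
        rw [← this]; exact hkj
      apply pvPairwise_of_len_le_one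
      rw [hpr1, hqc1]
      unfold pvCandsA
      by_cases hdot : (pvCell grid ki kj == ".") = true
      · rw [if_pos hdot]
        have hdot' : (grid.getD ki []).getD kj "" = "." := by
          have h := beq_iff_eq.mp hdot
          simpa [pvCell, PySem.List.pyGetD_natCast] using h
        have hkj'' : kj < (grid.getD ki []).length := by
          simpa [List.getD_eq_getElem?_getD, List.getElem?_eq_getElem, hki] using hkj'
        obtain ⟨-, -, -, -, hone⟩ := pv_and5 _ _ _ _ _ (hpre ki hki kj hkj'' hdot')
        rw [List.length_map]
        simp only [pvDirs, PySem.List.enumerate_cons, PySem.List.enumerate_nil]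
        by_cases h0 : pvCondA grid ki kj (-1) 0 <;>
          by_cases h1 : pvCondA grid ki kj 1 0 <;>
            by_cases h2 : pvCondA grid ki kj 0 (-1) <;>
              by_cases h3 : pvCondA grid ki kj 0 1 <;>
                simp_all [pvAtMostOne, List.filter_nil]
      · rw [if_neg hdot]; simp
    · apply (PySem.List.pairwise_lt_enumerate pr.2 0).imp
      intro qc qc' hlt x hx y hy
      obtain ⟨hx1, hx2, -, -⟩ := pvCandsA_shape grid pr.1 qc.1 x hx
      obtain ⟨hy1, hy2, -, -⟩ := pvCandsA_shape grid pr.1 qc'.1 y hy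
      rw [pvKeyDot_lt_iff]
      right
      simp only [pvErase]
      exact ⟨by omega, by omega⟩
  · apply (PySem.List.pairwise_lt_enumerate grid 0).imp
    intro pr pr' hlt x hx y hy
    rw [List.mem_flatMap] at hx hy
    obtain ⟨qc, _, hx⟩ := hx
    obtain ⟨qc', _, hy⟩ := hy
    obtain ⟨hx1, -, -, -⟩ := pvCandsA_shape grid pr.1 qc.1 x hx
    obtain ⟨hy1, -, -, -⟩ := pvCandsA_shape grid pr'.1 qc'.1 y hy
    rw [pvKeyDot_lt_iff]
    left
    simp only [pvErase]
    omega

theorem pvCandsB_shape (grid : List (List String)) (p q : Int) (e : pvEv)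
    (he : e ∈ pvCandsB grid p q) :
    (e.2.2.1 = 1 ∧ e.1 = p - 1 ∧ e.2.1 = q) ∨ (e.2.2.1 = 0 ∧ e.1 = p + 2 ∧ e.2.1 = q) ∨
    (e.2.2.1 = 3 ∧ e.1 = p ∧ e.2.1 = q - 1) ∨ (e.2.2.1 = 2 ∧ e.1 = p ∧ e.2.1 = q + 2) := by
  rw [pvMem_candsB_iff] at he
  rcases he.2 with ⟨_, _, rfl⟩ | ⟨_, _, rfl⟩ | ⟨_, _, rfl⟩ | ⟨_, _, rfl⟩
  · exact Or.inl ⟨rfl, rfl, rfl⟩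
  · exact Or.inr (Or.inl ⟨rfl, rfl, rfl⟩)
  · exact Or.inr (Or.inr (Or.inl ⟨rfl, rfl, rfl⟩))
  · exact Or.inr (Or.inr (Or.inr ⟨rfl, rfl, rfl⟩))

theorem pvCandsB_ne (grid : List (List String)) {p q p' q' : Int}
    (hne : p ≠ p' ∨ q ≠ q') {x y : pvEv} (hx : x ∈ pvCandsB grid p q)
    (hy : y ∈ pvCandsB grid p' q') : x ≠ y := by
  intro h
  subst h
  rcases pvCandsB_shape grid p q x hx with ⟨hk, h1, h2⟩ | ⟨hk, h1, h2⟩ | ⟨hk, h1, h2⟩ | ⟨hk, h1, h2⟩ <;>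
    rcases pvCandsB_shape grid p' q' x hy with ⟨hk', h1', h2'⟩ | ⟨hk', h1', h2'⟩ | ⟨hk', h1', h2'⟩ | ⟨hk', h1', h2'⟩ <;>
      rcases hne with hne | hne <;> omega

theorem pvCandsB_self_nodup (grid : List (List String)) (p q : Int) :
    (pvCandsB grid p q).Nodup := by
  unfold pvCandsB
  split_ifs <;> simp_all [Prod.ext_iff]

theorem pvCanonB_nodup (grid : List (List String)) : (pvEventsCanonB grid).Nodup := by
  unfold pvEventsCanonB List.Nodup
  rw [List.pairwise_flatMap]
  constructor
  · intro pr _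
    rw [List.pairwise_flatMap]
    constructor
    · intro qc _
      exact pvCandsB_self_nodup grid pr.1 qc.1
    · apply (PySem.List.pairwise_lt_enumerate pr.2 0).imp
      intro qc qc' hlt x hx y hy
      exact pvCandsB_ne grid (Or.inr (by omega)) hx hy
  · apply (PySem.List.pairwise_lt_enumerate grid 0).imp
    intro pr pr' hlt x hx y hy
    rw [List.mem_flatMap] at hx hy
    obtain ⟨qc, _, hx⟩ := hx
    obtain ⟨qc', _, hy⟩ := hy
    by_cases hq : qc.1 = qc'.1
    · exact pvCandsB_ne grid (Or.inl (by omega)) hx hy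
    · exact pvCandsB_ne grid (Or.inl (by omega)) hx hy

-- membership equivalence under Pre_ -----------------------------------------
theorem pvPreAt_spec (grid : List (List String)) (i j x y : Int)
    (h : pvPreAt grid i j x y = true)
    (ha1 : PySem.Str.strIsalpha (pvCell grid (i + x) (j + y)) = true)
    (ha2 : PySem.Str.strIsalpha (pvCell grid (i + 2 * x) (j + 2 * y)) = true) :
    (i + x < (grid.length : Int)) ∧
    (j + y < ((PySem.List.pyGetD grid (i + x) []).length : Int)) ∧
    (i + 2 * x < (grid.length : Int)) ∧
    (j + 2 * y < ((PySem.List.pyGetD grid (i + 2 * x) []).length : Int)) ∧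
    0 ≤ i + x ∧ 0 ≤ j + y ∧ 0 ≤ i + 2 * x ∧ 0 ≤ j + 2 * y := by
  simp only [pvPreAt, pvInR, ha1, ha2, Bool.not_true, Bool.false_or, Bool.and_eq_true,
    decide_eq_true_eq] at h
  obtain ⟨⟨h1, h2⟩, ⟨h4, h5⟩, ⟨⟨n1, n2⟩, n3⟩, n4⟩ := h
  exact ⟨h1.2, h2.2, h4.2, h5.2, n1, n2, n3, n4⟩

theorem pvMem_iff (grid : List (List String)) (hpre : Pre_compute_matching_doors grid)
    (e : pvEv) : e ∈ pvEventsCanonA grid ↔ e ∈ pvEventsCanonB grid := by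
  rw [pvMem_canonA_iff, pvMem_canonB_iff]
  constructor
  · rintro ⟨ki, kj, hki, hkj, hm⟩
    rw [pvMem_candsA_iff] at hm
    obtain ⟨hdot, hm⟩ := hm
    have hdot' : (grid.getD ki []).getD kj "" = "." := by
      have h := beq_iff_eq.mp hdot
      simpa [pvCell, PySem.List.pyGetD_natCast] using h
    obtain ⟨hp0, hp1, hp2, hp3, -⟩ := pv_and5 _ _ _ _ _ (hpre ki hki kj hkj hdot')
    have hGi : PySem.List.pyGetD grid (ki : Int) [] = grid.getD ki [] :=
      PySem.List.pyGetD_natCast grid ki []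
    rcases hm with ⟨hc, rfl⟩ | ⟨hc, rfl⟩ | ⟨hc, rfl⟩ | ⟨hc, rfl⟩
    · -- A direction (-1, 0), k = 0: dot below a vertical pair; anchor (ki - 2, kj)
      simp only [pvCondA, Bool.and_eq_true] at hc
      obtain ⟨ha1, ha2⟩ := hc
      have F0 : ((kj : Int) + 2 * 0) = (kj : Int) := by ring
      have F1 : ((kj : Int) + 0) = (kj : Int) := by ring
      rw [F1] at ha1
      rw [F0] at ha2
      obtain ⟨hs1, hs2, hs3, hs4, hn1, hn2, hn3, hn4⟩ :=
        pvPreAt_spec grid ki kj (-1) 0 hp0 (by rw [F1]; exact ha1) (by rw [F0]; exact ha2)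
      rw [F1] at hs2
      rw [F0] at hs4
      have E1 : ((ki - 2 : Nat) : Int) = (ki : Int) + 2 * -1 := by omega
      have E2 : ((ki : Int) + 2 * -1 + 1) = (ki : Int) + -1 := by ring
      have E3 : ((ki : Int) + 2 * -1 + 2) = (ki : Int) := by ring
      have hG2 : PySem.List.pyGetD grid ((ki : Int) + 2 * -1) [] = grid.getD (ki - 2) [] := by
        rw [← E1]; exact PySem.List.pyGetD_natCast grid (ki - 2) []
      rw [hG2] at hs4
      refine ⟨ki - 2, kj, by omega, by omega, ?_⟩
      rw [pvMem_candsB_iff, E1, E2, E3, hGi]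
      refine ⟨ha2, Or.inr (Or.inl ⟨?_, ?_, ?_⟩)⟩
      · simp only [Bool.and_eq_true, decide_eq_true_eq]
        exact ⟨⟨by omega, by omega⟩, ha1⟩
      · simp only [Bool.and_eq_true, decide_eq_true_eq]
        exact ⟨⟨by exact_mod_cast hki, by omega⟩, hdot⟩
      · rw [pvLabelA,
          min_eq_right (by omega : (ki : Int) + 2 * -1 ≤ (ki : Int) + -1),
          min_eq_right (by omega : (kj : Int) + 2 * 0 ≤ (kj : Int) + 0),
          max_eq_left (by omega : (ki : Int) + 2 * -1 ≤ (ki : Int) + -1),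
          max_eq_left (by omega : (kj : Int) + 2 * 0 ≤ (kj : Int) + 0), F0, F1]
    · -- A direction (1, 0), k = 1: dot above a vertical pair; anchor (ki + 1, kj)
      simp only [pvCondA, Bool.and_eq_true] at hc
      obtain ⟨ha1, ha2⟩ := hc
      have F0 : ((kj : Int) + 2 * 0) = (kj : Int) := by ring
      have F1 : ((kj : Int) + 0) = (kj : Int) := by ring
      rw [F1] at ha1
      rw [F0] at ha2
      obtain ⟨hs1, hs2, hs3, hs4, hn1, hn2, hn3, hn4⟩ :=
        pvPreAt_spec grid ki kj 1 0 hp1 (by rw [F1]; exact ha1) (by rw [F0]; exact ha2)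
      rw [F1] at hs2
      rw [F0] at hs4
      have E1 : ((ki + 1 : Nat) : Int) = (ki : Int) + 1 := by omega
      have E2 : ((ki : Int) + 1 + 1) = (ki : Int) + 2 * 1 := by ring
      have E3 : ((ki : Int) + 1 - 1) = (ki : Int) := by ring
      have hG2 : PySem.List.pyGetD grid ((ki : Int) + 1) [] = grid.getD (ki + 1) [] := by
        rw [← E1]; exact PySem.List.pyGetD_natCast grid (ki + 1) []
      rw [hG2] at hs2
      refine ⟨ki + 1, kj, by omega, by omega, ?_⟩
      rw [pvMem_candsB_iff, E1, E2, E3, hGi]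
      refine ⟨ha1, Or.inl ⟨?_, ?_, ?_⟩⟩
      · simp only [Bool.and_eq_true, decide_eq_true_eq]
        exact ⟨⟨by omega, by omega⟩, ha2⟩
      · simp only [Bool.and_eq_true, decide_eq_true_eq]
        exact ⟨⟨by omega, by omega⟩, hdot⟩
      · rw [pvLabelA,
          min_eq_left (by omega : (ki : Int) + 1 ≤ (ki : Int) + 2 * 1),
          min_eq_left (by omega : (kj : Int) + 0 ≤ (kj : Int) + 2 * 0),
          max_eq_right (by omega : (ki : Int) + 1 ≤ (ki : Int) + 2 * 1),
          max_eq_right (by omega : (kj : Int) + 0 ≤ (kj : Int) + 2 * 0), F0, F1]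
    · -- A direction (0, -1), k = 2: dot right of a horizontal pair; anchor (ki, kj - 2)
      simp only [pvCondA, Bool.and_eq_true] at hc
      obtain ⟨ha1, ha2⟩ := hc
      have F0 : ((ki : Int) + 2 * 0) = (ki : Int) := by ring
      have F1 : ((ki : Int) + 0) = (ki : Int) := by ring
      rw [F1] at ha1
      rw [F0] at ha2
      obtain ⟨hs1, hs2, hs3, hs4, hn1, hn2, hn3, hn4⟩ :=
        pvPreAt_spec grid ki kj 0 (-1) hp2 (by rw [F1]; exact ha1) (by rw [F0]; exact ha2)
      rw [F1, hGi] at hs2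
      rw [F0, hGi] at hs4
      have E1 : ((kj - 2 : Nat) : Int) = (kj : Int) + 2 * -1 := by omega
      have E2 : ((kj : Int) + 2 * -1 + 1) = (kj : Int) + -1 := by ring
      have E3 : ((kj : Int) + 2 * -1 + 2) = (kj : Int) := by ring
      refine ⟨ki, kj - 2, hki, ?_, ?_⟩
      · omega
      · rw [pvMem_candsB_iff, E1, E2, E3, hGi]
        refine ⟨ha2, Or.inr (Or.inr (Or.inr ⟨?_, ?_, ?_⟩))⟩
        · simp only [Bool.and_eq_true, decide_eq_true_eq]
          exact ⟨by omega, ha1⟩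
        · simp only [Bool.and_eq_true, decide_eq_true_eq]
          exact ⟨by omega, hdot⟩
        · rw [pvLabelA,
            min_eq_right (by omega : (kj : Int) + 2 * -1 ≤ (kj : Int) + -1),
            min_eq_right (by omega : (ki : Int) + 2 * 0 ≤ (ki : Int) + 0),
            max_eq_left (by omega : (kj : Int) + 2 * -1 ≤ (kj : Int) + -1),
            max_eq_left (by omega : (ki : Int) + 2 * 0 ≤ (ki : Int) + 0), F0, F1]
    · -- A direction (0, 1), k = 3: dot left of a horizontal pair; anchor (ki, kj + 1)
      simp only [pvCondA, Bool.and_eq_true] at hc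
      obtain ⟨ha1, ha2⟩ := hc
      have F0 : ((ki : Int) + 2 * 0) = (ki : Int) := by ring
      have F1 : ((ki : Int) + 0) = (ki : Int) := by ring
      rw [F1] at ha1
      rw [F0] at ha2
      obtain ⟨hs1, hs2, hs3, hs4, hn1, hn2, hn3, hn4⟩ :=
        pvPreAt_spec grid ki kj 0 1 hp3 (by rw [F1]; exact ha1) (by rw [F0]; exact ha2)
      rw [F1, hGi] at hs2
      rw [F0, hGi] at hs4
      have E1 : ((kj + 1 : Nat) : Int) = (kj : Int) + 1 := by omega
      have E2 : ((kj : Int) + 1 + 1) = (kj : Int) + 2 * 1 := by ring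
      have E3 : ((kj : Int) + 1 - 1) = (kj : Int) := by ring
      refine ⟨ki, kj + 1, hki, ?_, ?_⟩
      · omega
      · rw [pvMem_candsB_iff, E1, E2, E3, hGi]
        refine ⟨ha1, Or.inr (Or.inr (Or.inl ⟨?_, ?_, ?_⟩))⟩
        · simp only [Bool.and_eq_true, decide_eq_true_eq]
          exact ⟨by omega, ha2⟩
        · simp only [Bool.and_eq_true, decide_eq_true_eq]
          exact ⟨by omega, hdot⟩
        · rw [pvLabelA,
            min_eq_left (by omega : (kj : Int) + 1 ≤ (kj : Int) + 2 * 1),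
            min_eq_left (by omega : (ki : Int) + 0 ≤ (ki : Int) + 2 * 0),
            max_eq_right (by omega : (kj : Int) + 1 ≤ (kj : Int) + 2 * 1),
            max_eq_right (by omega : (ki : Int) + 0 ≤ (ki : Int) + 2 * 0), F0, F1]
  · rintro ⟨kp, kq, hkp, hkq, hm⟩
    rw [pvMem_candsB_iff] at hm
    obtain ⟨halpha, hm⟩ := hm
    have hGp : PySem.List.pyGetD grid (kp : Int) [] = grid.getD kp [] :=
      PySem.List.pyGetD_natCast grid kp []
    rcases hm with ⟨hv, hd, rfl⟩ | ⟨hv, hd, rfl⟩ | ⟨hh, hd, rfl⟩ | ⟨hh, hd, rfl⟩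
    · -- B kind 1: dot above the vertical pair, at (kp - 1, kq)
      simp only [Bool.and_eq_true, decide_eq_true_eq] at hv hd
      obtain ⟨⟨hv1, hv2⟩, hv3⟩ := hv
      obtain ⟨⟨hd1, hd2⟩, hd3⟩ := hd
      have E1 : ((kp - 1 : Nat) : Int) = (kp : Int) - 1 := by omega
      have C1 : ((kp : Int) - 1 + 1) = (kp : Int) := by ring
      have C2 : ((kp : Int) - 1 + 2 * 1) = (kp : Int) + 1 := by ring
      have E4 : ((kq : Int) + 0) = (kq : Int) := by ring
      have E5 : ((kq : Int) + 2 * 0) = (kq : Int) := by ring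
      have hG2 : PySem.List.pyGetD grid ((kp : Int) - 1) [] = grid.getD (kp - 1) [] := by
        rw [← E1]; exact PySem.List.pyGetD_natCast grid (kp - 1) []
      rw [hG2] at hd2
      refine ⟨kp - 1, kq, by omega, by omega, ?_⟩
      rw [pvMem_candsA_iff, E1]
      refine ⟨hd3, Or.inr (Or.inl ⟨?_, ?_⟩)⟩
      · rw [pvCondA]
        simp only [C1, C2, E4, E5, Bool.and_eq_true]
        exact ⟨halpha, hv3⟩
      · rw [pvLabelA]
        simp only [C1, C2, E4, E5]
        rw [min_eq_left (by omega : (kp : Int) ≤ (kp : Int) + 1), min_self,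
          max_eq_right (by omega : (kp : Int) ≤ (kp : Int) + 1), max_self]
    · -- B kind 0: dot below the vertical pair, at (kp + 2, kq)
      simp only [Bool.and_eq_true, decide_eq_true_eq] at hv hd
      obtain ⟨⟨hv1, hv2⟩, hv3⟩ := hv
      obtain ⟨⟨hd1, hd2⟩, hd3⟩ := hd
      have E1 : ((kp + 2 : Nat) : Int) = (kp : Int) + 2 := by omega
      have C1 : ((kp : Int) + 2 + -1) = (kp : Int) + 1 := by ring
      have C2 : ((kp : Int) + 2 + 2 * -1) = (kp : Int) := by ring
      have E4 : ((kq : Int) + 0) = (kq : Int) := by ring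
      have E5 : ((kq : Int) + 2 * 0) = (kq : Int) := by ring
      have hG2 : PySem.List.pyGetD grid ((kp : Int) + 2) [] = grid.getD (kp + 2) [] := by
        rw [← E1]; exact PySem.List.pyGetD_natCast grid (kp + 2) []
      rw [hG2] at hd2
      refine ⟨kp + 2, kq, by omega, by omega, ?_⟩
      rw [pvMem_candsA_iff, E1]
      refine ⟨hd3, Or.inl ⟨?_, ?_⟩⟩
      · rw [pvCondA]
        simp only [C1, C2, E4, E5, Bool.and_eq_true]
        exact ⟨hv3, halpha⟩
      · rw [pvLabelA]
        simp only [C1, C2, E4, E5]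
        rw [min_eq_right (by omega : (kp : Int) ≤ (kp : Int) + 1), min_self,
          max_eq_left (by omega : (kp : Int) ≤ (kp : Int) + 1), max_self]
    · -- B kind 3: dot left of the horizontal pair, at (kp, kq - 1)
      simp only [Bool.and_eq_true, decide_eq_true_eq] at hh hd
      obtain ⟨hh1, hh2⟩ := hh
      obtain ⟨hd1, hd2⟩ := hd
      have E1 : ((kq - 1 : Nat) : Int) = (kq : Int) - 1 := by omega
      have C1 : ((kq : Int) - 1 + 1) = (kq : Int) := by ring
      have C2 : ((kq : Int) - 1 + 2 * 1) = (kq : Int) + 1 := by ring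
      have E4 : ((kp : Int) + 0) = (kp : Int) := by ring
      have E5 : ((kp : Int) + 2 * 0) = (kp : Int) := by ring
      rw [hGp] at hh1
      refine ⟨kp, kq - 1, hkp, by omega, ?_⟩
      rw [pvMem_candsA_iff, E1]
      refine ⟨hd2, Or.inr (Or.inr (Or.inr ⟨?_, ?_⟩))⟩
      · rw [pvCondA]
        simp only [C1, C2, E4, E5, Bool.and_eq_true]
        exact ⟨halpha, hh2⟩
      · rw [pvLabelA]
        simp only [C1, C2, E4, E5]
        rw [min_eq_left (by omega : (kq : Int) ≤ (kq : Int) + 1), min_self,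
          max_eq_right (by omega : (kq : Int) ≤ (kq : Int) + 1), max_self]
    · -- B kind 2: dot right of the horizontal pair, at (kp, kq + 2)
      simp only [Bool.and_eq_true, decide_eq_true_eq] at hh hd
      obtain ⟨hh1, hh2⟩ := hh
      obtain ⟨hd1, hd2⟩ := hd
      have E1 : ((kq + 2 : Nat) : Int) = (kq : Int) + 2 := by omega
      have C1 : ((kq : Int) + 2 + -1) = (kq : Int) + 1 := by ring
      have C2 : ((kq : Int) + 2 + 2 * -1) = (kq : Int) := by ring
      have E4 : ((kp : Int) + 0) = (kp : Int) := by ring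
      have E5 : ((kp : Int) + 2 * 0) = (kp : Int) := by ring
      rw [hGp] at hd1
      refine ⟨kp, kq + 2, hkp, by omega, ?_⟩
      rw [pvMem_candsA_iff, E1]
      refine ⟨hd2, Or.inr (Or.inr (Or.inl ⟨?_, ?_⟩))⟩
      · rw [pvCondA]
        simp only [C1, C2, E4, E5, Bool.and_eq_true]
        exact ⟨hh2, halpha⟩
      · rw [pvLabelA]
        simp only [C1, C2, E4, E5]
        rw [min_eq_right (by omega : (kq : Int) ≤ (kq : Int) + 1), min_self,
          max_eq_left (by omega : (kq : Int) ≤ (kq : Int) + 1), max_self]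

theorem pvCanonA_nodup (grid : List (List String))
    (hpre : Pre_compute_matching_doors grid) : (pvEventsCanonA grid).Nodup := by
  exact (pvCanonA_pairwise_dot grid hpre).imp
    (fun h => by intro he; exact absurd (he ▸ h) (lt_irrefl _))

theorem pvPerm (grid : List (List String)) (hpre : Pre_compute_matching_doors grid) :
    (pvEventsCanonA grid).Perm (pvEventsCanonB grid) := by
  exact (List.perm_ext_iff_of_nodup (pvCanonA_nodup grid hpre)
    (pvCanonB_nodup grid)).mpr (pvMem_iff grid hpre)

theorem pvSorted_eq (grid : List (List String)) (hpre : Pre_compute_matching_doors grid) :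
    PySem.List.sorted (pvEventsB grid) (fun e => toLex (e.1, e.2.1)) =
      (pvEventsCanonA grid).map pvErase := by
  rw [pvEventsB_eq]
  refine PySem.List.sorted_eq_of_perm_of_pairwise_lt _ _ pvKeyDot
    ((pvPerm grid hpre).map pvErase) ?_
  rw [List.pairwise_map]
  exact pvCanonA_pairwise_dot grid hpre

theorem pvAddDoorB_eq (d : PySem.Dict String (List (Int × Int))) (label : String)
    (pos : Int × Int) : pvAddDoorB d label pos = pvAddDoorA d label pos := by
  unfold pvAddDoorA pvAddDoorB
  by_cases h : d.contains label
  · rw [PySem.Dict.setdefault_of_contains d [] h, if_pos h]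
  · rw [PySem.Dict.setdefault_of_not_contains d [] (by simpa using h), if_neg h]
    show (d.insert label []).insert label _ = _
    rw [PySem.Dict.insert_insert_self]
    simp [PySem.Dict.getD_insert_self]

-- ===== VERDICT (by name: the statement is the Claim_ definition above) =====
theorem compute_matching_doors_spec : Claim_equal_compute_matching_doors := by
  intro grid _hdom hpre
  unfold Spec_compute_matching_doors
  show compute_matching_doors grid = compute_matching_doors_alt grid
  have hA : compute_matching_doors grid = pvPhase2A ((pvEventsCanonA grid).foldl
      (fun d e => pvAddDoorA d e.2.2.2 (e.1, e.2.1)) PySem.Dict.empty) :=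
    congrArg pvPhase2A (pvDoorsA_eq grid)
  have hB : compute_matching_doors_alt grid = pvPhase2B
      ((PySem.List.sorted (pvEventsB grid) (fun e => toLex (e.1, e.2.1))).foldl
        (fun d e => pvAddDoorB d e.2.2 (e.1, e.2.1)) PySem.Dict.empty) := rfl
  rw [hA, hB, pvSorted_eq grid hpre, List.foldl_map]
  have hfun : (fun (d : PySem.Dict String (List (Int × Int))) (e : pvEv) =>
      pvAddDoorB d (pvErase e).2.2 ((pvErase e).1, (pvErase e).2.1)) =
      (fun d e => pvAddDoorA d e.2.2.2 (e.1, e.2.1)) := by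
    funext d e; exact pvAddDoorB_eq d e.2.2.2 (e.1, e.2.1)
  rw [hfun]
  rfl
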